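-- pv_equiv track=rewrite | github.com/luisfdez/htmap | htcmap/mapper.py | zip_args_and_kwargs
-- ===== SOURCE A (Python) =====
-- from typing import Any, Tuple, Iterable, Dict, Union, Optional, List, Callable
-- import itertools
--
-- def zip_args_and_kwargs(args: Iterable[Tuple], kwargs: Iterable[Dict]):
--     iterators = [iter(args), iter(kwargs)]
--     fills = {0: (), 1: {}}
--     num_active = 2
--     while True:
--         values = []
--         for i, it in enumerate(iterators):
--             try:
--                 value = next(it)
--             except StopIteration:
--                 num_active -= 1
--                 if num_active == 0:
--                     return
--                 iterators[i] = itertools.repeat(fills[i])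
--                 value = fills[i]
--             values.append(value)
--         yield tuple(values)
-- ===== SOURCE B (Python) =====
-- def zip_args_and_kwargs(args, kwargs):
--     # Staged approach: materialize both streams, pad each to the common
--     # length with its fill in separate passes, then plain zip.
--     a = list(args)
--     k = list(kwargs)
--     n = max(len(a), len(k))
--     a.extend(() for _ in range(n - len(a)))
--     k.extend({} for _ in range(n - len(k)))
--     yield from zip(a, k)
-- ===== Notes on version B (the rewrite author's own statement) =====
-- stated objective: simpler
-- what changed: B replaces A's lockstep merge (iterator list, num_active counter, try/except StopIteration, itertools.repeat substitution) by staged passes: materialize both streams, pad each to the common length with its fill, then a plain zip; unlike A it is not lazy on infinite iterables.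
import Mathlib
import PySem

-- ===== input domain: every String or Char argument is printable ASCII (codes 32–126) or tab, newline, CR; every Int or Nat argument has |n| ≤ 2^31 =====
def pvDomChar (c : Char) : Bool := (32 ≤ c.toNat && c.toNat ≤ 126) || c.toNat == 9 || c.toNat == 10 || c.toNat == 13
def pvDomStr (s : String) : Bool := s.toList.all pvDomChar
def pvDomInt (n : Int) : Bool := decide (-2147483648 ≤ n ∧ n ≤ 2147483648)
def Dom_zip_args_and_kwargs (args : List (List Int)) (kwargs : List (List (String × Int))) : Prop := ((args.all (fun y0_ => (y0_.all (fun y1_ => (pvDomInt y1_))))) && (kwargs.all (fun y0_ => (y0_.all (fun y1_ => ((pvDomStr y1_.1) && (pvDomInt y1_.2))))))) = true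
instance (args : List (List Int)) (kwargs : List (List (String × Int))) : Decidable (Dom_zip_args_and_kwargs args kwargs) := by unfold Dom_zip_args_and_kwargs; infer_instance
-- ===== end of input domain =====

-- B replaces A's lockstep merge (iterator list, num_active counter, try/except StopIteration,
-- itertools.repeat substitution) by staged passes: materialize, pad each side to the common
-- length with its fill, then a plain zip; B is not lazy, the equivalence is about the finite
-- sequence of yielded pairs.

-- ===== PORT A =====
-- Loop state of A's 'while True': the remaining elements of each iterator plus a flag saying
-- whether that iterator was already replaced by itertools.repeat(fill) (ra/rk); a repeat
-- iterator yields its fill ([] here) forever.  num_active = (if ra then 0 else 1) +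
-- (if rk then 0 else 1); the 'return' fires when a StopIteration drops it to 0.
def zaakLoopA (as : List (List Int)) (ra : Bool) (ks : List (List (String × Int))) (rk : Bool) :
    List (List Int × List (String × Int)) :=
  match ra, as with
  | false, a :: as' =>                         -- next(iter(args)) succeeds, value = a
    (match rk, ks with
     | false, k :: ks' => (a, k) :: zaakLoopA as' false ks' false
     | false, []       => (a, []) :: zaakLoopA as' false [] true   -- kwargs StopIteration: num_active 2→1, repeat({})
     | true,  ks2      => (a, []) :: zaakLoopA as' false ks2 true) -- kwargs iterator is repeat({})
  | false, [] =>                               -- args StopIteration: num_active -= 1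
    if rk then []                              -- other iterator already a repeat: num_active 1→0, return
    else
      match ks with
      | k :: ks' => ([], k) :: zaakLoopA [] true ks' false         -- args becomes repeat(()), value = ()
      | []       => []                         -- kwargs also StopIteration: num_active 1→0, return
  | true, as2 =>                               -- args iterator is repeat(()), value = ()
    match ks with
    | k :: ks' => ([], k) :: zaakLoopA as2 true ks' false
    | []       => []                           -- kwargs StopIteration: num_active 1→0, return
termination_by as.length + ks.length

def zip_args_and_kwargs (args : List (List Int)) (kwargs : List (List (String × Int))) :
    List (List Int × (List (String × Int))) :=
  zaakLoopA args false kwargs false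

-- ===== PORT B =====
-- Source B: a = list(args); k = list(kwargs); n = max(len(a), len(k));
-- a.extend(() …); k.extend({} …); yield from zip(a, k).
def zip_args_and_kwargs_alt (args : List (List Int)) (kwargs : List (List (String × Int))) :
    List (List Int × (List (String × Int))) :=
  let n := max args.length kwargs.length
  let a := args ++ List.replicate (n - args.length) []
  let k := kwargs ++ List.replicate (n - kwargs.length) []
  a.zip k

-- ===== PRECONDITION & SPEC =====
def Spec_zip_args_and_kwargs (args : List (List Int)) (kwargs : List (List (String × Int))) (out : List (List Int × (List (String × Int)))) : Prop := out = zip_args_and_kwargs_alt args kwargs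
instance (args : List (List Int)) (kwargs : List (List (String × Int))) (out : List (List Int × (List (String × Int)))) : Decidable (Spec_zip_args_and_kwargs args kwargs out) := by unfold Spec_zip_args_and_kwargs; infer_instance

-- ===== CLAIM =====
def Claim_equal_zip_args_and_kwargs : Prop := ∀ (args : List (List Int)) (kwargs : List (List (String × Int))), Dom_zip_args_and_kwargs args kwargs → Spec_zip_args_and_kwargs args kwargs (zip_args_and_kwargs args kwargs)

-- ===== LEMMAS AND PROOFS =====
-- After args has been replaced by repeat(()), A pairs each remaining kwarg with [].
theorem zaakLoopA_repeatArgs (as : List (List Int)) (ks : List (List (String × Int))) :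
    zaakLoopA as true ks false = ks.map (fun k => ([], k)) := by
  induction ks with
  | nil => rw [zaakLoopA.eq_def]; simp
  | cons k ks' ih => rw [zaakLoopA.eq_def]; simp [ih]

-- After kwargs has been replaced by repeat({}), A pairs each remaining arg with [].
theorem zaakLoopA_repeatKwargs (as : List (List Int)) :
    zaakLoopA as false [] true = as.map (fun a => (a, [])) := by
  induction as with
  | nil => rw [zaakLoopA.eq_def]; simp
  | cons a as' ih => rw [zaakLoopA.eq_def]; simp [ih]

theorem zip_replicate_left (ks : List (List (String × Int))) :
    (List.replicate ks.length ([] : List Int)).zip ks = ks.map (fun k => ([], k)) := by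
  induction ks with
  | nil => simp
  | cons k ks' ih => simp [List.replicate_succ, ih]

theorem zip_replicate_right (as : List (List Int)) :
    as.zip (List.replicate as.length ([] : List (String × Int))) = as.map (fun a => (a, [])) := by
  induction as with
  | nil => simp
  | cons a as' ih => simp [List.replicate_succ, ih]

theorem zaakLoopA_eq_padZip (as : List (List Int)) (ks : List (List (String × Int))) :
    zaakLoopA as false ks false =
      (as ++ List.replicate (max as.length ks.length - as.length) []).zip
        (ks ++ List.replicate (max as.length ks.length - ks.length) []) := by
  induction as generalizing ks with
  | nil =>
    cases ks with
    | nil => rw [zaakLoopA.eq_def]; simp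
    | cons k ks' =>
      rw [zaakLoopA.eq_def]
      simp [zaakLoopA_repeatArgs, List.replicate_succ, zip_replicate_left]
  | cons a as' ih =>
    cases ks with
    | nil =>
      rw [zaakLoopA.eq_def]
      simp [zaakLoopA_repeatKwargs, List.replicate_succ, zip_replicate_right]
    | cons k ks' =>
      rw [zaakLoopA.eq_def]
      simpa [List.replicate_succ, Nat.succ_max_succ] using ih ks'

-- ===== VERDICT =====
theorem zip_args_and_kwargs_spec : Claim_equal_zip_args_and_kwargs := by
  intro args kwargs _
  unfold Spec_zip_args_and_kwargs zip_args_and_kwargs zip_args_and_kwargs_alt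
  exact zaakLoopA_eq_padZip args kwargs
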